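-- pv_equiv track=rewrite | github.com/RiverYanggg/SteelDig_multimodal | paper_extractor/knowledge/chunker.py | _build_structure_blocks
-- ===== SOURCE A (Python) =====
-- from typing import Iterable, List
--
-- def _build_structure_blocks(
--     items: List[tuple[int, int, int, str, str, int, int]],
--     max_chars: int,
--     target_chars: int,
-- ) -> List[List[tuple[int, int, int, str, str, int, int]]]:
--     blocks: List[List[tuple[int, int, int, str, str, int, int]]] = []
--     for primary_block in _split_on_heading_levels(items, {1}):
--         if _block_chars(primary_block) <= max_chars:
--             blocks.append(primary_block)
--             continue
--         secondary_blocks = _split_on_heading_levels(primary_block, {2})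
--         for secondary_block in secondary_blocks:
--             if _block_chars(secondary_block) <= max_chars:
--                 blocks.append(secondary_block)
--             else:
--                 blocks.extend(_split_by_chars(secondary_block, max_chars=max_chars, target_chars=target_chars))
--     return [block for block in blocks if block]
--
-- def _split_on_heading_levels(
--     items: List[tuple[int, int, int, str, str, int, int]],
--     heading_levels: set[int],
-- ) -> List[List[tuple[int, int, int, str, str, int, int]]]:
--     blocks: List[List[tuple[int, int, int, str, str, int, int]]] = []
--     current: List[tuple[int, int, int, str, str, int, int]] = []
--     for item in items:
--         heading_level = item[6]
--         if current and heading_level in heading_levels: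
--             blocks.append(current)
--             current = []
--         current.append(item)
--     if current:
--         blocks.append(current)
--     return blocks
--
-- def _split_by_chars(
--     items: List[tuple[int, int, int, str, str, int, int]],
--     max_chars: int,
--     target_chars: int,
-- ) -> List[List[tuple[int, int, int, str, str, int, int]]]:
--     blocks: List[List[tuple[int, int, int, str, str, int, int]]] = []
--     current: List[tuple[int, int, int, str, str, int, int]] = []
--     current_chars = 0
--     limit = max(1, min(max_chars, target_chars))
--     for item in items:
--         item_chars = len(item[3])
--         if current and current_chars + item_chars > limit:
--             blocks.append(current)
--             current = []
--             current_chars = 0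
--         current.append(item)
--         current_chars += item_chars
--     if current:
--         blocks.append(current)
--     return blocks
--
-- def _block_chars(block: List[tuple[int, int, int, str, str, int, int]]) -> int:
--     return sum(len(item[3]) for item in block)
-- ===== SOURCE B (Python) =====
-- from typing import Callable, List
--
--
-- def _build_structure_blocks(
--     items: List[tuple[int, int, int, str, str, int, int]],
--     max_chars: int,
--     target_chars: int,
-- ) -> List[List[tuple[int, int, int, str, str, int, int]]]:
--     limit = max(1, min(max_chars, target_chars))
--     strategies: List[Callable] = [
--         lambda xs: _split_before(xs, lambda it: it[6] == 1),
--         lambda xs: _split_before(xs, lambda it: it[6] == 2),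
--         lambda xs: _chunk_by_chars(xs, limit),
--     ]
--     return [block for block in _cascade(items, strategies, max_chars) if block]
--
--
-- def _cascade(items, strategies, max_chars):
--     head, rest = strategies[0], strategies[1:]
--     parts = head(items)
--     if not rest:
--         return parts
--     return [
--         block
--         for part in parts
--         for block in (
--             [part]
--             if sum(len(it[3]) for it in part) <= max_chars
--             else _cascade(part, rest, max_chars)
--         )
--     ]
--
--
-- def _split_before(xs, is_boundary):
--     blocks = []
--     i, n = 0, len(xs)
--     while i < n:
--         j = i + 1
--         while j < n and not is_boundary(xs[j]):
--             j += 1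
--         blocks.append(xs[i:j])
--         i = j
--     return blocks
--
--
-- def _chunk_by_chars(xs, limit):
--     blocks = []
--     i, n = 0, len(xs)
--     while i < n:
--         chars = len(xs[i][3])
--         j = i + 1
--         while j < n and chars + len(xs[j][3]) <= limit:
--             chars += len(xs[j][3])
--             j += 1
--         blocks.append(xs[i:j])
--         i = j
--     return blocks
-- ===== Notes on version B (the rewrite author's own statement) =====
-- stated objective: alternative
-- what changed: A's hard-wired two-level nesting (outer loop over level-1 blocks, inner loop over level-2 blocks) with accumulator-and-flush splitters is replaced by one recursive cascade over an ordered list of split strategies, whose heading and char splitters are index-based two-pointer scans producing slices.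
import Mathlib
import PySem

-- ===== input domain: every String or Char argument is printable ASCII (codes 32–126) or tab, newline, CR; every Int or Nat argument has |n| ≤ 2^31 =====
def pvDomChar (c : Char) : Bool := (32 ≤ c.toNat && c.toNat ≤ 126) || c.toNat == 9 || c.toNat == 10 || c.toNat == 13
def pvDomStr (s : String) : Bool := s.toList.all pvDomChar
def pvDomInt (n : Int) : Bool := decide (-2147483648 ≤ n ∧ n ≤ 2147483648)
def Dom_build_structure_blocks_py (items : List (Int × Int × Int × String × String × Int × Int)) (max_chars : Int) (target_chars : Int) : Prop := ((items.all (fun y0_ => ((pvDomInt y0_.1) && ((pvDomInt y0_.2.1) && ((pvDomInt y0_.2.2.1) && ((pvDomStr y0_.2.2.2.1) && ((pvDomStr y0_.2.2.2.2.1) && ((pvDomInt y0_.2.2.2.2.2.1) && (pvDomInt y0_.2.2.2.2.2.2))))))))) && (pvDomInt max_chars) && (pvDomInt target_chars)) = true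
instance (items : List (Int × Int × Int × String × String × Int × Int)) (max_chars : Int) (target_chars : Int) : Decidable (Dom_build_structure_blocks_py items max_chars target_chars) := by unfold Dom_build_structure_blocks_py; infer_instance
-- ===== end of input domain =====

-- B replaces A's hard-wired two-level split (outer loop over level-1 blocks, inner loop over level-2
-- blocks, accumulator-style splitters) by one recursive cascade over a list of split strategies, with
-- index/slice two-pointer splitters; return value proved equal on all inputs (objective: alternative).

abbrev PvItem := Int × Int × Int × String × String × Int × Int

-- ===== PORT A =====
-- _block_chars: sum(len(item[3]) for item in block)
def pvBlockChars (block : List PvItem) : Int :=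
  (block.map (fun it => PySem.Str.len it.2.2.2.1)).sum

-- _split_on_heading_levels (the set heading_levels is passed as its list of distinct elements)
def pvSplitHeadA (items : List PvItem) (levels : List Int) : List (List PvItem) :=
  let st := items.foldl
    (fun (s : List (List PvItem) × List PvItem) item =>
      if !s.2.isEmpty && levels.contains item.2.2.2.2.2.2 then (s.1 ++ [s.2], [item])
      else (s.1, s.2 ++ [item]))
    ([], [])
  if st.2.isEmpty then st.1 else st.1 ++ [st.2]

-- _split_by_chars
def pvSplitCharsA (items : List PvItem) (max_chars : Int) (target_chars : Int) : List (List PvItem) :=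
  let limit := max 1 (min max_chars target_chars)
  let st := items.foldl
    (fun (s : List (List PvItem) × List PvItem × Int) item =>
      let item_chars := PySem.Str.len item.2.2.2.1
      if !s.2.1.isEmpty && decide (limit < s.2.2 + item_chars) then (s.1 ++ [s.2.1], [item], item_chars)
      else (s.1, s.2.1 ++ [item], s.2.2 + item_chars))
    ([], [], 0)
  if st.2.1.isEmpty then st.1 else st.1 ++ [st.2.1]

def build_structure_blocks_py (items : List (Int × Int × Int × String × String × Int × Int)) (max_chars : Int) (target_chars : Int) : List (List (Int × Int × Int × String × String × Int × Int)) :=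
  let blocks := (pvSplitHeadA items [1]).foldl
    (fun blocks primary_block =>
      if decide (pvBlockChars primary_block ≤ max_chars) then blocks ++ [primary_block]
      else (pvSplitHeadA primary_block [2]).foldl
        (fun b secondary_block =>
          if decide (pvBlockChars secondary_block ≤ max_chars) then b ++ [secondary_block]
          else b ++ pvSplitCharsA secondary_block max_chars target_chars)
        blocks)
    []
  blocks.filter (fun b => !b.isEmpty)

-- ===== PORT B =====
-- inner 'while j < n and not is_boundary(xs[j]): j += 1'
def pvFindBoundary (pred : PvItem → Bool) (xs : List PvItem) (j : Nat) : Nat :=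
  if h : j < xs.length then
    (if pred xs[j] then j else pvFindBoundary pred xs (j + 1))
  else j
termination_by xs.length - j
decreasing_by
  exact Nat.sub_succ_lt_self _ _ h

theorem le_pvFindBoundary (pred : PvItem → Bool) (xs : List PvItem) (j : Nat) :
    j ≤ pvFindBoundary pred xs j := by
  fun_induction pvFindBoundary pred xs j with
  | case1 => omega
  | case2 _ _ _ ih => omega
  | case3 => omega

-- outer 'while i < n' of _split_before
def pvSplitBeforeGo (pred : PvItem → Bool) (xs : List PvItem) (i : Nat) : List (List PvItem) :=
  if h : i < xs.length then
    let j := pvFindBoundary pred xs (i + 1)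
    PySem.List.slice xs (some (i : Int)) (some (j : Int)) :: pvSplitBeforeGo pred xs j
  else []
termination_by xs.length - i
decreasing_by
  exact Nat.lt_of_le_of_lt (Nat.sub_le_sub_left (le_pvFindBoundary pred xs (i + 1)) xs.length)
    (Nat.sub_succ_lt_self _ _ h)

def pvSplitBefore (pred : PvItem → Bool) (xs : List PvItem) : List (List PvItem) :=
  pvSplitBeforeGo pred xs 0

-- inner 'while j < n and chars + len(xs[j][3]) <= limit'
def pvChunkEnd (limit : Int) (xs : List PvItem) (chars : Int) (j : Nat) : Nat :=
  if h : j < xs.length then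
    (if chars + PySem.Str.len (xs[j]).2.2.2.1 ≤ limit then
       pvChunkEnd limit xs (chars + PySem.Str.len (xs[j]).2.2.2.1) (j + 1)
     else j)
  else j
termination_by xs.length - j
decreasing_by
  exact Nat.sub_succ_lt_self _ _ h

theorem le_pvChunkEnd (limit : Int) (xs : List PvItem) (chars : Int) (j : Nat) :
    j ≤ pvChunkEnd limit xs chars j := by
  fun_induction pvChunkEnd limit xs chars j with
  | case1 _ _ _ _ ih => omega
  | case2 => omega
  | case3 => omega

-- outer 'while i < n' of _chunk_by_chars
def pvChunkGo (limit : Int) (xs : List PvItem) (i : Nat) : List (List PvItem) :=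
  if h : i < xs.length then
    let j := pvChunkEnd limit xs (PySem.Str.len (xs[i]).2.2.2.1) (i + 1)
    PySem.List.slice xs (some (i : Int)) (some (j : Int)) :: pvChunkGo limit xs j
  else []
termination_by xs.length - i
decreasing_by
  exact Nat.lt_of_le_of_lt
    (Nat.sub_le_sub_left (le_pvChunkEnd limit xs (PySem.Str.len (xs[i]).2.2.2.1) (i + 1)) xs.length)
    (Nat.sub_succ_lt_self _ _ h)

def pvChunkByChars (xs : List PvItem) (limit : Int) : List (List PvItem) :=
  pvChunkGo limit xs 0

-- _cascade(items, strategies, max_chars)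
def pvCascade (max_chars : Int) : List PvItem → List (List PvItem → List (List PvItem)) → List (List PvItem)
  | _, [] => []
  | items, s :: rest =>
    let parts := s items
    if rest.isEmpty then parts
    else parts.flatMap (fun part =>
      if decide (pvBlockChars part ≤ max_chars) then [part] else pvCascade max_chars part rest)

def build_structure_blocks_py_alt (items : List (Int × Int × Int × String × String × Int × Int)) (max_chars : Int) (target_chars : Int) : List (List (Int × Int × Int × String × String × Int × Int)) :=
  let limit := max 1 (min max_chars target_chars)
  let strategies : List (List PvItem → List (List PvItem)) :=
    [fun xs => pvSplitBefore (fun it => it.2.2.2.2.2.2 == 1) xs,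
     fun xs => pvSplitBefore (fun it => it.2.2.2.2.2.2 == 2) xs,
     fun xs => pvChunkByChars xs limit]
  (pvCascade max_chars items strategies).filter (fun b => !b.isEmpty)

-- ===== PRECONDITION & SPEC =====
def Spec_build_structure_blocks_py (items : List (Int × Int × Int × String × String × Int × Int)) (max_chars : Int) (target_chars : Int) (out : List (List (Int × Int × Int × String × String × Int × Int))) : Prop := out = build_structure_blocks_py_alt items max_chars target_chars
instance (items : List (Int × Int × Int × String × String × Int × Int)) (max_chars : Int) (target_chars : Int) (out : List (List (Int × Int × Int × String × String × Int × Int))) : Decidable (Spec_build_structure_blocks_py items max_chars target_chars out) := by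
  unfold Spec_build_structure_blocks_py
  have : DecidableEq (String × Int × Int) := inferInstance
  have : DecidableEq (String × String × Int × Int) := inferInstance
  have : DecidableEq (Int × String × String × Int × Int) := inferInstance
  have : DecidableEq (Int × Int × String × String × Int × Int) := inferInstance
  have : DecidableEq (Int × Int × Int × String × String × Int × Int) := inferInstance
  have : DecidableEq (List (Int × Int × Int × String × String × Int × Int)) := inferInstance
  infer_instance

-- ===== CLAIM (what is proved, stated in full; the proofs are below) =====
def Claim_equal_build_structure_blocks_py : Prop := ∀ (items : List (Int × Int × Int × String × String × Int × Int)) (max_chars : Int) (target_chars : Int), Dom_build_structure_blocks_py items max_chars target_chars → Spec_build_structure_blocks_py items max_chars target_chars (build_structure_blocks_py items max_chars target_chars)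

-- ===== LEMMAS AND PROOFS =====

-- reference splitter: span-based "split before each pred-item"
def pvSp (pred : PvItem → Bool) : List PvItem → List (List PvItem)
  | [] => []
  | x :: xs =>
    (x :: xs.takeWhile (fun y => !pred y)) :: pvSp pred (xs.dropWhile (fun y => !pred y))
termination_by l => l.length
decreasing_by
  simpa using Nat.lt_succ_of_le (List.length_dropWhile_le _ _)

-- reference chunker
def pvExt (limit : Int) (c : Int) : List PvItem → List PvItem × List PvItem
  | [] => ([], [])
  | y :: ys =>
    if c + PySem.Str.len y.2.2.2.1 ≤ limit then
      let r := pvExt limit (c + PySem.Str.len y.2.2.2.1) ys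
      (y :: r.1, r.2)
    else ([], y :: ys)

theorem pvExt_snd_length_le (limit c : Int) (l : List PvItem) :
    (pvExt limit c l).2.length ≤ l.length := by
  fun_induction pvExt limit c l with
  | case1 => simp
  | case2 _ _ _ _ _ ih => simpa using Nat.le_succ_of_le ih
  | case3 => simp

def pvCk (limit : Int) : List PvItem → List (List PvItem)
  | [] => []
  | x :: xs =>
    (x :: (pvExt limit (PySem.Str.len x.2.2.2.1) xs).1) ::
      pvCk limit (pvExt limit (PySem.Str.len x.2.2.2.1) xs).2
termination_by l => l.length
decreasing_by
  simpa using Nat.lt_succ_of_le (pvExt_snd_length_le _ _ _)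

-- ===== A-side: foldl splitters equal the reference splitters =====
theorem pvSplitHeadA_inv (pred : PvItem → Bool) (items : List PvItem)
    (bs : List (List PvItem)) (cur : List PvItem) (h : cur ≠ []) :
    (if ((items.foldl
          (fun (s : List (List PvItem) × List PvItem) item =>
            if !s.2.isEmpty && pred item then (s.1 ++ [s.2], [item])
            else (s.1, s.2 ++ [item])) (bs, cur)).2.isEmpty) then
        (items.foldl
          (fun (s : List (List PvItem) × List PvItem) item =>
            if !s.2.isEmpty && pred item then (s.1 ++ [s.2], [item])
            else (s.1, s.2 ++ [item])) (bs, cur)).1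
      else
        (items.foldl
          (fun (s : List (List PvItem) × List PvItem) item =>
            if !s.2.isEmpty && pred item then (s.1 ++ [s.2], [item])
            else (s.1, s.2 ++ [item])) (bs, cur)).1 ++
        [(items.foldl
          (fun (s : List (List PvItem) × List PvItem) item =>
            if !s.2.isEmpty && pred item then (s.1 ++ [s.2], [item])
            else (s.1, s.2 ++ [item])) (bs, cur)).2])
    = bs ++ (cur ++ items.takeWhile (fun y => !pred y)) ::
        pvSp pred (items.dropWhile (fun y => !pred y)) := by
  induction items generalizing bs cur with
  | nil =>
    have hce : cur.isEmpty = false := by simpa using h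
    simp [hce, pvSp]
  | cons x t ih =>
    have hce : cur.isEmpty = false := by simpa using h
    by_cases hp : pred x = true
    · have hc : (!cur.isEmpty && pred x) = true := by simp [hce, hp]
      simp only [List.foldl_cons, hc, if_true]
      rw [ih (bs ++ [cur]) [x] (by simp)]
      simp [pvSp, hp]
    · have hc : (!cur.isEmpty && pred x) = false := by simp [hp]
      simp only [List.foldl_cons, hc, Bool.false_eq_true, if_false]
      rw [ih bs (cur ++ [x]) (by simp)]
      simp [hp]

theorem pvSplitHeadA_eq_sp (items : List PvItem) (levels : List Int) :
    pvSplitHeadA items levels = pvSp (fun it => levels.contains it.2.2.2.2.2.2) items := by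
  cases items with
  | nil => simp [pvSplitHeadA, pvSp]
  | cons x t =>
    unfold pvSplitHeadA
    dsimp only
    rw [show List.foldl
        (fun (s : List (List PvItem) × List PvItem) item =>
          if !s.2.isEmpty && levels.contains item.2.2.2.2.2.2 then (s.1 ++ [s.2], [item])
          else (s.1, s.2 ++ [item])) ([], []) (x :: t)
      = List.foldl
        (fun (s : List (List PvItem) × List PvItem) item =>
          if !s.2.isEmpty && levels.contains item.2.2.2.2.2.2 then (s.1 ++ [s.2], [item])
          else (s.1, s.2 ++ [item])) ([], [x]) t from by
      rw [List.foldl_cons]; congr 1]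
    have hinv := pvSplitHeadA_inv (fun it => levels.contains it.2.2.2.2.2.2) t [] [x] (by simp)
    dsimp only at hinv
    rw [hinv]
    simp [pvSp]

theorem pvSplitCharsA_inv (limit : Int) (items : List PvItem)
    (bs : List (List PvItem)) (cur : List PvItem) (c : Int) (h : cur ≠ []) :
    (if ((items.foldl
          (fun (s : List (List PvItem) × List PvItem × Int) item =>
            if !s.2.1.isEmpty && decide (limit < s.2.2 + PySem.Str.len item.2.2.2.1) then
              (s.1 ++ [s.2.1], [item], PySem.Str.len item.2.2.2.1)
            else (s.1, s.2.1 ++ [item], s.2.2 + PySem.Str.len item.2.2.2.1)) (bs, cur, c)).2.1.isEmpty) then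
        (items.foldl
          (fun (s : List (List PvItem) × List PvItem × Int) item =>
            if !s.2.1.isEmpty && decide (limit < s.2.2 + PySem.Str.len item.2.2.2.1) then
              (s.1 ++ [s.2.1], [item], PySem.Str.len item.2.2.2.1)
            else (s.1, s.2.1 ++ [item], s.2.2 + PySem.Str.len item.2.2.2.1)) (bs, cur, c)).1
      else
        (items.foldl
          (fun (s : List (List PvItem) × List PvItem × Int) item =>
            if !s.2.1.isEmpty && decide (limit < s.2.2 + PySem.Str.len item.2.2.2.1) then
              (s.1 ++ [s.2.1], [item], PySem.Str.len item.2.2.2.1)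
            else (s.1, s.2.1 ++ [item], s.2.2 + PySem.Str.len item.2.2.2.1)) (bs, cur, c)).1 ++
        [(items.foldl
          (fun (s : List (List PvItem) × List PvItem × Int) item =>
            if !s.2.1.isEmpty && decide (limit < s.2.2 + PySem.Str.len item.2.2.2.1) then
              (s.1 ++ [s.2.1], [item], PySem.Str.len item.2.2.2.1)
            else (s.1, s.2.1 ++ [item], s.2.2 + PySem.Str.len item.2.2.2.1)) (bs, cur, c)).2.1])
    = bs ++ (cur ++ (pvExt limit c items).1) :: pvCk limit (pvExt limit c items).2 := by
  induction items generalizing bs cur c with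
  | nil =>
    have hce : cur.isEmpty = false := by simpa using h
    simp [hce, pvExt, pvCk]
  | cons y t ih =>
    have hce : cur.isEmpty = false := by simpa using h
    by_cases hy : limit < c + (y.2.2.2.1.length : Int)
    · have hc : (!cur.isEmpty && decide (limit < c + PySem.Str.len y.2.2.2.1)) = true := by
        simp [hce, PySem.Str.len_eq, hy]
      simp only [List.foldl_cons, hc, if_true]
      rw [ih (bs ++ [cur]) [y] (PySem.Str.len y.2.2.2.1) (by simp)]
      simp [pvExt, pvCk, PySem.Str.len_eq, not_le.mpr hy]
    · have hc : (!cur.isEmpty && decide (limit < c + PySem.Str.len y.2.2.2.1)) = false := by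
        simp [PySem.Str.len_eq, hy]
      simp only [List.foldl_cons, hc, Bool.false_eq_true, if_false]
      rw [ih bs (cur ++ [y]) (c + PySem.Str.len y.2.2.2.1) (by simp)]
      have hyle : c + (y.2.2.2.1.length : Int) ≤ limit := by omega
      simp [pvExt, PySem.Str.len_eq, hyle]

theorem pvSplitCharsA_eq_ck (items : List PvItem) (mc tc : Int) :
    pvSplitCharsA items mc tc = pvCk (max 1 (min mc tc)) items := by
  cases items with
  | nil => simp [pvSplitCharsA, pvCk]
  | cons x t =>
    unfold pvSplitCharsA
    dsimp only
    rw [show List.foldl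
        (fun (s : List (List PvItem) × List PvItem × Int) item =>
          if !s.2.1.isEmpty && decide (max 1 (min mc tc) < s.2.2 + PySem.Str.len item.2.2.2.1) then
            (s.1 ++ [s.2.1], [item], PySem.Str.len item.2.2.2.1)
          else (s.1, s.2.1 ++ [item], s.2.2 + PySem.Str.len item.2.2.2.1)) ([], [], 0) (x :: t)
      = List.foldl
        (fun (s : List (List PvItem) × List PvItem × Int) item =>
          if !s.2.1.isEmpty && decide (max 1 (min mc tc) < s.2.2 + PySem.Str.len item.2.2.2.1) then
            (s.1 ++ [s.2.1], [item], PySem.Str.len item.2.2.2.1)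
          else (s.1, s.2.1 ++ [item], s.2.2 + PySem.Str.len item.2.2.2.1)) ([], [x], PySem.Str.len x.2.2.2.1) t from by
      rw [List.foldl_cons]; congr 1; simp]
    rw [pvSplitCharsA_inv (max 1 (min mc tc)) t [] [x] (PySem.Str.len x.2.2.2.1) (by simp)]
    simp [pvCk]

-- ===== B-side: index/slice splitters equal the reference splitters =====
theorem pvFindBoundary_span (pred : PvItem → Bool) (xs : List PvItem) (j : Nat) :
    (xs.drop j).takeWhile (fun y => !pred y) = (xs.drop j).take (pvFindBoundary pred xs j - j) ∧
    (xs.drop j).dropWhile (fun y => !pred y) = xs.drop (pvFindBoundary pred xs j) := by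
  fun_induction pvFindBoundary pred xs j with
  | case1 j h hp =>
    constructor
    · rw [List.drop_eq_getElem_cons h, List.takeWhile_cons_of_neg (by simp [hp])]
      simp
    · rw [List.drop_eq_getElem_cons h, List.dropWhile_cons_of_neg (by simp [hp]),
        ← List.drop_eq_getElem_cons h]
  | case2 j h hp ih =>
    have hp' : pred xs[j] = false := by simpa using hp
    have hle := le_pvFindBoundary pred xs (j + 1)
    obtain ⟨ih1, ih2⟩ := ih
    have he : pvFindBoundary pred xs (j + 1) - j
        = (pvFindBoundary pred xs (j + 1) - (j + 1)) + 1 := by omega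
    constructor
    · rw [List.drop_eq_getElem_cons h, List.takeWhile_cons_of_pos (by simp [hp']), he,
        List.take_succ_cons, ih1]
    · rw [List.drop_eq_getElem_cons h, List.dropWhile_cons_of_pos (by simp [hp'])]
      exact ih2
  | case3 j h =>
    have hd : xs.drop j = [] := List.drop_eq_nil_of_le (by omega)
    simp [hd]

theorem pvSplitBeforeGo_eq_sp (pred : PvItem → Bool) (xs : List PvItem) (i : Nat) :
    pvSplitBeforeGo pred xs i = pvSp pred (xs.drop i) := by
  fun_induction pvSplitBeforeGo pred xs i with
  | case1 i h j ih =>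
    have hj : j = pvFindBoundary pred xs (i + 1) := rfl
    have hle := le_pvFindBoundary pred xs (i + 1)
    obtain ⟨h1, h2⟩ := pvFindBoundary_span pred xs (i + 1)
    rw [List.drop_eq_getElem_cons h]
    simp only [pvSp]
    rw [ih, hj, h2]
    congr 1
    rw [h1, PySem.List.slice_natCast, List.drop_eq_getElem_cons h]
    have he : pvFindBoundary pred xs (i + 1) - i
        = (pvFindBoundary pred xs (i + 1) - (i + 1)) + 1 := by omega
    rw [he, List.take_succ_cons]
  | case2 i h =>
    have hd : xs.drop i = [] := List.drop_eq_nil_of_le (by omega)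
    simp [hd, pvSp]

theorem pvChunkEnd_span (limit : Int) (xs : List PvItem) (c : Int) (j : Nat) :
    (xs.drop j).take (pvChunkEnd limit xs c j - j) = (pvExt limit c (xs.drop j)).1 ∧
    xs.drop (pvChunkEnd limit xs c j) = (pvExt limit c (xs.drop j)).2 := by
  fun_induction pvChunkEnd limit xs c j with
  | case1 c j h hp ih =>
    have hle := le_pvChunkEnd limit xs (c + PySem.Str.len (xs[j]).2.2.2.1) (j + 1)
    obtain ⟨ih1, ih2⟩ := ih
    rw [List.drop_eq_getElem_cons h]
    simp only [pvExt]
    rw [if_pos hp]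
    constructor
    · have he : pvChunkEnd limit xs (c + PySem.Str.len (xs[j]).2.2.2.1) (j + 1) - j
          = (pvChunkEnd limit xs (c + PySem.Str.len (xs[j]).2.2.2.1) (j + 1) - (j + 1)) + 1 := by
        omega
      rw [he, List.take_succ_cons, ih1]
    · exact ih2
  | case2 c j h hp =>
    rw [List.drop_eq_getElem_cons h]
    simp only [pvExt]
    rw [if_neg hp]
    exact ⟨by simp, rfl⟩
  | case3 c j h =>
    have hd : xs.drop j = [] := List.drop_eq_nil_of_le (by omega)
    simp [hd, pvExt]

theorem pvChunkGo_eq_ck (limit : Int) (xs : List PvItem) (i : Nat) :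
    pvChunkGo limit xs i = pvCk limit (xs.drop i) := by
  fun_induction pvChunkGo limit xs i with
  | case1 i h j ih =>
    have hj : j = pvChunkEnd limit xs (PySem.Str.len (xs[i]).2.2.2.1) (i + 1) := rfl
    have hle := le_pvChunkEnd limit xs (PySem.Str.len (xs[i]).2.2.2.1) (i + 1)
    obtain ⟨h1, h2⟩ := pvChunkEnd_span limit xs (PySem.Str.len (xs[i]).2.2.2.1) (i + 1)
    rw [List.drop_eq_getElem_cons h]
    simp only [pvCk]
    rw [ih, hj, h2]
    congr 1
    rw [PySem.List.slice_natCast, ← h1, List.drop_eq_getElem_cons h]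
    have he : pvChunkEnd limit xs (PySem.Str.len (xs[i]).2.2.2.1) (i + 1) - i
        = (pvChunkEnd limit xs (PySem.Str.len (xs[i]).2.2.2.1) (i + 1) - (i + 1)) + 1 := by omega
    rw [he, List.take_succ_cons]
  | case2 i h =>
    have hd : xs.drop i = [] := List.drop_eq_nil_of_le (by omega)
    simp [hd, pvCk]

-- membership in the singleton level-sets {1}, {2}
theorem pv_contains_singleton (a x : Int) : ([a] : List Int).contains x = (x == a) := by
  simp
  rfl

-- ===== the main equivalence =====
theorem pv_main (items : List PvItem) (mc tc : Int) :
    build_structure_blocks_py items mc tc = build_structure_blocks_py_alt items mc tc := by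
  unfold build_structure_blocks_py build_structure_blocks_py_alt
  dsimp only
  congr 1
  -- rewrite A's two foldl loops into flatMap form
  have hinner : ∀ (p : List PvItem) (acc : List (List PvItem)),
      (pvSplitHeadA p [2]).foldl
        (fun b s =>
          if decide (pvBlockChars s ≤ mc) then b ++ [s]
          else b ++ pvSplitCharsA s mc tc) acc
      = acc ++ (pvSplitHeadA p [2]).flatMap
          (fun s => if decide (pvBlockChars s ≤ mc) then [s] else pvSplitCharsA s mc tc) := by
    intro p acc
    rw [show (fun (b : List (List PvItem)) s =>
          if decide (pvBlockChars s ≤ mc) then b ++ [s]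
          else b ++ pvSplitCharsA s mc tc)
        = (fun b s => b ++ if decide (pvBlockChars s ≤ mc) then [s] else pvSplitCharsA s mc tc) from
      by funext b s; split <;> rfl]
    exact PySem.List.foldl_append_eq_flatMap _ _ _
  have houter :
      (pvSplitHeadA items [1]).foldl
        (fun blocks p =>
          if decide (pvBlockChars p ≤ mc) then blocks ++ [p]
          else (pvSplitHeadA p [2]).foldl
            (fun b s =>
              if decide (pvBlockChars s ≤ mc) then b ++ [s]
              else b ++ pvSplitCharsA s mc tc) blocks) []
      = (pvSplitHeadA items [1]).flatMap
          (fun p => if decide (pvBlockChars p ≤ mc) then [p]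
            else (pvSplitHeadA p [2]).flatMap
              (fun s => if decide (pvBlockChars s ≤ mc) then [s] else pvSplitCharsA s mc tc)) := by
    rw [show (fun (blocks : List (List PvItem)) p =>
          if decide (pvBlockChars p ≤ mc) then blocks ++ [p]
          else (pvSplitHeadA p [2]).foldl
            (fun b s =>
              if decide (pvBlockChars s ≤ mc) then b ++ [s]
              else b ++ pvSplitCharsA s mc tc) blocks)
        = (fun blocks p => blocks ++ if decide (pvBlockChars p ≤ mc) then [p]
            else (pvSplitHeadA p [2]).flatMap
              (fun s => if decide (pvBlockChars s ≤ mc) then [s] else pvSplitCharsA s mc tc)) from by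
      funext blocks p
      split
      · rfl
      · exact hinner p blocks]
    simpa using PySem.List.foldl_append_eq_flatMap _ _ ([] : List (List PvItem))
  rw [houter]
  -- unfold B's cascade on the three strategies
  simp only [pvCascade, List.isEmpty_nil, List.isEmpty_cons, Bool.false_eq_true, if_false, if_true]
  -- identify the splitters
  have h1 : ∀ ys : List PvItem,
      pvSplitBefore (fun it => it.2.2.2.2.2.2 == 1) ys = pvSplitHeadA ys [1] := by
    intro ys
    rw [pvSplitHeadA_eq_sp, pvSplitBefore, pvSplitBeforeGo_eq_sp]
    simp only [pv_contains_singleton, List.drop_zero]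
  have h2 : ∀ ys : List PvItem,
      pvSplitBefore (fun it => it.2.2.2.2.2.2 == 2) ys = pvSplitHeadA ys [2] := by
    intro ys
    rw [pvSplitHeadA_eq_sp, pvSplitBefore, pvSplitBeforeGo_eq_sp]
    simp only [pv_contains_singleton, List.drop_zero]
  have h3 : ∀ ys : List PvItem,
      pvChunkByChars ys (max 1 (min mc tc)) = pvSplitCharsA ys mc tc := by
    intro ys
    rw [pvSplitCharsA_eq_ck, pvChunkByChars, pvChunkGo_eq_ck, List.drop_zero]
  rw [h1]
  congr 1
  funext p
  split
  · rfl
  · rw [h2]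
    congr 1
    funext s
    split
    · rfl
    · exact (h3 s).symm

-- ===== VERDICT (by name: the statement is the Claim_ definition above) =====
theorem build_structure_blocks_py_spec : Claim_equal_build_structure_blocks_py := by
  intro items mc tc _
  unfold Spec_build_structure_blocks_py
  exact pv_main items mc tc
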